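-- pv_equiv track=rewrite | github.com/ajay-sudosu/code_snippets | next_fast/backend/drchrono_sync.py | is_results_final
-- ===== SOURCE A (Python) =====
-- def is_results_final(lab_results):
--     """Returns False if any result status is P or I else return True"""
--     tests_dict = {}
--     for result in lab_results:
--         test = result.get('observation_description')
--         status = result.get('status')
--         tests_dict[test] = result.get('status')
--     for status in tests_dict.values():
--         if status == 'P' or status == 'I':
--             return False
--     return True
-- ===== SOURCE B (Python) =====
-- def is_results_final(lab_results):
--     """Returns False if any result status is P or I else return True"""
--     seen = set()
--     for result in reversed(list(lab_results)):
--         test = result.get('observation_description')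
--         if test in seen:
--             continue
--         seen.add(test)
--         if result.get('status') in ('P', 'I'):
--             return False
--     return True
-- ===== Notes on version B (the rewrite author's own statement) =====
-- stated objective: alternative
-- what changed: Replaces A's two passes (build a full test->status dict, then scan its values) with one reverse pass that keeps only a set of seen test keys and returns False early at the first pending status (first occurrence in reverse = A's last-wins dict value).
import Mathlib
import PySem

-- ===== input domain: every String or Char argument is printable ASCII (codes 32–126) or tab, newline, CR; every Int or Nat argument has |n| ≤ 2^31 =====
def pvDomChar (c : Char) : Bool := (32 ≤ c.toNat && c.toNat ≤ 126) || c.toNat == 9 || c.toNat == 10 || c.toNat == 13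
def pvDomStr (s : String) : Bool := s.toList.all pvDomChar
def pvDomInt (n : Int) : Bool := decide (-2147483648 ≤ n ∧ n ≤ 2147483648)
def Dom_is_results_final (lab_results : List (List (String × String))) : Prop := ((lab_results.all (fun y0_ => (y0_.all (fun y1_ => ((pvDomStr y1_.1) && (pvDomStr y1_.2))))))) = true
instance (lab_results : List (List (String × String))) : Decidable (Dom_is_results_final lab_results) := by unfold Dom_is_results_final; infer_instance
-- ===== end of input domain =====

-- B replaces A's build-a-full-dict-then-scan with a single reverse pass keeping only a seen-keys set
-- and exiting early on the first pending status (objective: alternative decomposition, same O(n) cost).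

-- ===== PORT A =====
-- A's second loop: 'for status in tests_dict.values(): if status == 'P' or status == 'I': return False / return True'
def pvCheckValuesA : List (Option String) → Bool
  | [] => true
  | status :: rest =>
      if status == some "P" || status == some "I" then false else pvCheckValuesA rest

def is_results_final (lab_results : List (List (String × String))) : Bool :=
  -- tests_dict = {}; for result in lab_results: tests_dict[result.get('observation_description')] = result.get('status')
  let tests_dict : PySem.Dict (Option String) (Option String) :=
    lab_results.foldl
      (fun d result =>
        d.insert ((PySem.Dict.ofList result).get? "observation_description")
                 ((PySem.Dict.ofList result).get? "status"))
      PySem.Dict.empty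
  pvCheckValuesA tests_dict.values

-- ===== PORT B =====
-- B's loop: reverse pass with a 'seen' set, skipping already-decided tests, early return False
def pvGoB : List (List (String × String)) → PySem.Set (Option String) → Bool
  | [], _ => true
  | result :: rest, seen =>
      let test := (PySem.Dict.ofList result).get? "observation_description"
      if PySem.Set.contains seen test then
        pvGoB rest seen
      else if (PySem.Dict.ofList result).get? "status" == some "P"
           || (PySem.Dict.ofList result).get? "status" == some "I" then false
      else pvGoB rest (PySem.Set.add seen test)

def is_results_final_alt (lab_results : List (List (String × String))) : Bool :=
  pvGoB lab_results.reverse PySem.Set.empty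

-- ===== PRECONDITION & SPEC =====
def Spec_is_results_final (lab_results : List (List (String × String))) (out : Bool) : Prop := out = is_results_final_alt lab_results
instance (lab_results : List (List (String × String))) (out : Bool) : Decidable (Spec_is_results_final lab_results out) := by unfold Spec_is_results_final; infer_instance

-- ===== CLAIM (what is proved, stated in full; the proofs are below) =====
def Claim_equal_is_results_final : Prop := ∀ (lab_results : List (List (String × String))), Dom_is_results_final lab_results → Spec_is_results_final lab_results (is_results_final lab_results)

-- ===== LEMMAS AND PROOFS =====
def pvKeyOf (r : List (String × String)) : Option String :=
  (PySem.Dict.ofList r).get? "observation_description"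

def pvStatOf (r : List (String × String)) : Option String :=
  (PySem.Dict.ofList r).get? "status"

def pvBad (s : Option String) : Bool := s == some "P" || s == some "I"

lemma pvCheckValuesA_iff (vs : List (Option String)) :
    pvCheckValuesA vs = true ↔ ∀ v ∈ vs, pvBad v = false := by
  induction vs with
  | nil => simp [pvCheckValuesA]
  | cons v rest ih =>
      by_cases h : pvBad v = true
      · simp [pvCheckValuesA, pvBad] at h ⊢
        rcases h with h | h <;> simp [h]
      · simp only [Bool.not_eq_true] at h
        have hv : (v == some "P" || v == some "I") = false := h
        simp [pvCheckValuesA, hv, ih, h]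

lemma pvGet_buildA (xs : List (List (String × String)))
    (d : PySem.Dict (Option String) (Option String)) (k : Option String) :
    (xs.foldl
       (fun d result =>
         d.insert ((PySem.Dict.ofList result).get? "observation_description")
                  ((PySem.Dict.ofList result).get? "status")) d).get? k
    = ((xs.reverse.find? (fun r => pvKeyOf r == k)).map pvStatOf).or (d.get? k) := by
  induction xs generalizing d with
  | nil => simp
  | cons r rest ih =>
      simp only [List.foldl_cons, List.reverse_cons, List.find?_append, ih]
      cases hf : rest.reverse.find? (fun r => pvKeyOf r == k) with
      | some r' => simp
      | none =>
          simp only [Option.none_or, Option.map_none]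
          rw [PySem.Dict.get?_insert]
          by_cases hk : pvKeyOf r = k
          · have hb : (pvKeyOf r == k) = true := by simp [hk]
            simp only [List.find?_cons, hb]
            simp [pvKeyOf, pvStatOf, hk.symm]
          · have hb : (pvKeyOf r == k) = false := by simp [hk]
            simp only [List.find?_cons, hb]
            have : ¬ (k = (PySem.Dict.ofList r).get? "observation_description") := by
              intro h; exact hk (by simp [pvKeyOf, h])
            simp [this]

lemma pvA_iff (xs : List (List (String × String))) :
    is_results_final xs = true ↔
      ∀ (k : Option String) (r : List (String × String)),
        xs.reverse.find? (fun r => pvKeyOf r == k) = some r → pvBad (pvStatOf r) = false := by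
  unfold is_results_final
  simp only []
  set d := xs.foldl
      (fun d result =>
        d.insert ((PySem.Dict.ofList result).get? "observation_description")
                 ((PySem.Dict.ofList result).get? "status"))
      PySem.Dict.empty with hd
  have hnd : d.keys.Nodup := by
    rw [hd]
    exact PySem.Dict.nodup_keys_foldl_insert_key xs
      (fun result => (PySem.Dict.ofList result).get? "observation_description")
      (fun d result => (PySem.Dict.ofList result).get? "status")
      PySem.Dict.empty PySem.Dict.nodup_keys_empty
  rw [pvCheckValuesA_iff]
  constructor
  · intro h k r hr
    have hget : d.get? k = some (pvStatOf r) := by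
      rw [hd, pvGet_buildA, hr]; simp
    have hmem : (k, pvStatOf r) ∈ d.items :=
      PySem.Dict.mem_items_of_get?_eq_some d hget
    have hv : pvStatOf r ∈ d.items.map Prod.snd := List.mem_map.2 ⟨(k, pvStatOf r), hmem, rfl⟩
    exact h _ hv
  · intro h v hv
    simp only [PySem.Dict.values, List.mem_map] at hv
    obtain ⟨⟨k, v'⟩, hmem, hv'⟩ := hv
    subst hv'
    have hget : d.get? k = some v' := (PySem.Dict.get?_eq_some_iff_mem_items d k v' hnd).2 hmem
    rw [hd, pvGet_buildA] at hget
    simp only [PySem.Dict.get?_empty, Option.or_none, Option.map_eq_some_iff] at hget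
    obtain ⟨r, hr, hst⟩ := hget
    subst hst
    exact h k r hr

lemma pvGoB_iff (ys : List (List (String × String))) (S : PySem.Set (Option String)) :
    pvGoB ys S = true ↔
      ∀ (r : List (String × String)),
        ys.find? (fun r' => pvKeyOf r' == pvKeyOf r) = some r →
        pvKeyOf r ∉ S → pvBad (pvStatOf r) = false := by
  induction ys generalizing S with
  | nil => simp [pvGoB]
  | cons r rest ih =>
      by_cases hS : pvKeyOf r ∈ S
      · have hc : PySem.Set.contains S (pvKeyOf r) = true := (PySem.Set.contains_iff S (pvKeyOf r)).2 hS
        rw [show pvGoB (r :: rest) S = pvGoB rest S by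
              simp [pvGoB, pvKeyOf] at hc ⊢; simp [hc], ih]
        constructor
        · intro h r'' hf hnS
          by_cases hk : pvKeyOf r == pvKeyOf r''
          · exact absurd ((beq_iff_eq.mp hk) ▸ hS) hnS
          · rw [List.find?_cons_of_neg (by simp [hk])] at hf
            exact h r'' hf hnS
        · intro h r'' hf hnS
          by_cases hk : pvKeyOf r == pvKeyOf r''
          · exact absurd ((beq_iff_eq.mp hk) ▸ hS) hnS
          · exact h r'' (by rw [List.find?_cons_of_neg (by simp [hk])]; exact hf) hnS
      · have hS' : ((PySem.Dict.ofList r).get? "observation_description") ∉ S := hS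
        by_cases hb : pvBad (pvStatOf r) = true
        · have : pvGoB (r :: rest) S = false := by
            simp only [pvGoB]
            simp only [pvBad, pvStatOf] at hb
            rcases Bool.or_eq_true_iff.1 hb with hb' | hb' <;>
              simp [hS', beq_iff_eq.mp hb']
          rw [this]
          constructor
          · intro h; exact absurd h (by simp)
          · intro h
            have := h r (List.find?_cons_of_pos (by simp)) hS
            rw [hb] at this; exact absurd this (by simp)
        · simp only [Bool.not_eq_true] at hb
          have hstep : pvGoB (r :: rest) S = pvGoB rest (PySem.Set.add S (pvKeyOf r)) := by
            simp only [pvBad, pvStatOf, Bool.or_eq_false_iff, beq_eq_false_iff_ne, ne_eq] at hb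
            simp [pvGoB, pvKeyOf, hS', hb.1, hb.2]
          rw [hstep, ih]
          constructor
          · intro h r'' hf hnS
            by_cases hk : pvKeyOf r == pvKeyOf r''
            · rw [List.find?_cons_of_pos (by simpa using hk)] at hf
              have : r = r'' := by injection hf
              subst this; exact hb
            · rw [List.find?_cons_of_neg (by simp [hk])] at hf
              refine h r'' hf ?_
              rw [PySem.Set.mem_add]
              push Not
              exact ⟨hnS, fun he => by simp [he] at hk⟩
          · intro h r'' hf hnS
            rw [PySem.Set.mem_add] at hnS
            push Not at hnS
            have hk : (pvKeyOf r == pvKeyOf r'') = false := by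
              simp; exact fun he => hnS.2 he.symm
            exact h r'' (by rw [List.find?_cons_of_neg (by simp [hk])]; exact hf) hnS.1

-- ===== VERDICT (by name: the statement is the Claim_ definition above) =====
theorem is_results_final_spec : Claim_equal_is_results_final := by
  intro xs _
  unfold Spec_is_results_final is_results_final_alt
  rw [Bool.eq_iff_iff, pvA_iff, pvGoB_iff]
  constructor
  · intro h r hf _
    exact h (pvKeyOf r) r hf
  · intro h k r hf
    have hk : pvKeyOf r = k := by
      have := List.find?_some hf
      simpa using this
    exact h r (by rwa [hk]) (by simp [PySem.Set.empty])
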